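-- pv_equiv track=rewrite | github.com/Chavez0296/python | unitFoursessionOne.py | find_best_fabric_pair
-- ===== SOURCE A (Python) =====
-- def find_best_fabric_pair(fabrics, budget):
--     n = len(fabrics)
--
--     sortCost = sorted((cost,name) for name, cost in fabrics)
--
--     left, right = 0, n-1
--     bestSum = -1
--     bestPair = (None,None)
--
--     while left < right:
--         leftCost, leftName = sortCost[left]
--         rightCost, rightName = sortCost [right]
--         tot = leftCost + rightCost
--
--         if tot > budget:
--             right -= 1
--         else:
--             if tot > bestSum:
--                 bestSum = tot
--                 bestPair = (leftName,rightName)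
--             left +=1
--
--     return bestPair
--     pass
-- ===== SOURCE B (Python) =====
-- def find_best_fabric_pair(fabrics, budget):
--     s = sorted((cost, name) for name, cost in fabrics)
--     bestSum, bestPair = -1, (None, None)
--     while s:
--         (ci, ni), s = s[0], s[1:]
--         for cj, nj in reversed(s):
--             tot = ci + cj
--             if tot <= budget and tot > bestSum:
--                 bestSum, bestPair = tot, (ni, nj)
--     return bestPair
-- ===== Notes on version B (the rewrite author's own statement) =====
-- stated objective: simpler
-- what changed: Replaced the index-juggling two-pointer sweep with a plain exhaustive double loop over the sorted list (outer: ascending suffix peel, inner: remaining costs in descending order, strict improvement), which returns the identical best pair including tie-breaking.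
import Mathlib
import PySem

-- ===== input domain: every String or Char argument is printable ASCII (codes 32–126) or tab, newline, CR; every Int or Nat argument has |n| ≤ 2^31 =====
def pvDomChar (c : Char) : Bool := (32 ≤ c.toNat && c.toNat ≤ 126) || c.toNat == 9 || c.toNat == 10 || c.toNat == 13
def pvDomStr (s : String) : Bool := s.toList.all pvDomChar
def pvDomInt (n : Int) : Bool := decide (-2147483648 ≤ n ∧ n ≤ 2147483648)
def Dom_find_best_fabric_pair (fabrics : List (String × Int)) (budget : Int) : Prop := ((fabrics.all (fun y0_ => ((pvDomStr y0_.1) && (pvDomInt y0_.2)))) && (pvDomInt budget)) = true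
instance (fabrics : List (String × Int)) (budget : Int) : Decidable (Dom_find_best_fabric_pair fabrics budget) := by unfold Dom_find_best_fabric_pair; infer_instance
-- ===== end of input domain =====

-- B replaces A's two-pointer sweep over the sorted costs by a plain exhaustive double loop
-- (rows ascending, columns descending, strict improvement) — same return value, simpler control flow.

-- ===== PORT A =====
-- the while-loop of A; on every reachable state 0 ≤ left < right < s.length, so the
-- pyGetD default (0, "") is never consulted (Python's s[left]/s[right] never raises here)
def pvLoopA (s : List (Int × String)) (budget : Int) (left right bestSum : Int)
    (bestPair : Option String × Option String) : Option String × Option String :=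
  if _h : left < right then
    let lp := PySem.List.pyGetD s left (0, "")
    let rp := PySem.List.pyGetD s right (0, "")
    let tot := lp.1 + rp.1
    if tot > budget then
      pvLoopA s budget left (right - 1) bestSum bestPair
    else
      if tot > bestSum then
        pvLoopA s budget (left + 1) right tot (some lp.2, some rp.2)
      else
        pvLoopA s budget (left + 1) right bestSum bestPair
  else bestPair
termination_by (right - left).toNat
decreasing_by all_goals omega

def find_best_fabric_pair (fabrics : List (String × Int)) (budget : Int) : Option String × Option String :=
  let n : Int := fabrics.length
  let sortCost := PySem.List.sorted2 (fabrics.map (fun p => (p.2, p.1))) (fun x => x.1) (fun x => x.2)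
  pvLoopA sortCost budget 0 (n - 1) (-1) (none, none)

-- ===== PORT B =====
-- inner 'for cj, nj in reversed(s)' loop of Source B
def pvInnerB (budget ci : Int) (ni : String) (rest : List (Int × String))
    (st : Int × (Option String × Option String)) : Int × (Option String × Option String) :=
  rest.reverse.foldl
    (fun st p =>
      let tot := ci + p.1
      if tot ≤ budget ∧ tot > st.1 then (tot, (some ni, some p.2)) else st)
    st

-- outer 'while s:' loop of Source B, peeling the head of the remaining sorted suffix
def pvLoopB (budget : Int) : List (Int × String) → Int × (Option String × Option String) → Option String × Option String
  | [], st => st.2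
  | (ci, ni) :: rest, st => pvLoopB budget rest (pvInnerB budget ci ni rest st)

def find_best_fabric_pair_alt (fabrics : List (String × Int)) (budget : Int) : Option String × Option String :=
  let s := PySem.List.sorted2 (fabrics.map (fun p => (p.2, p.1))) (fun x => x.1) (fun x => x.2)
  pvLoopB budget s (-1, (none, none))

-- ===== PRECONDITION & SPEC =====
def Spec_find_best_fabric_pair (fabrics : List (String × Int)) (budget : Int) (out : Option String × Option String) : Prop := out = find_best_fabric_pair_alt fabrics budget
instance (fabrics : List (String × Int)) (budget : Int) (out : Option String × Option String) : Decidable (Spec_find_best_fabric_pair fabrics budget out) := by unfold Spec_find_best_fabric_pair; infer_instance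

-- ===== CLAIM (what is proved, stated in full; the proofs are below) =====
def Claim_equal_find_best_fabric_pair : Prop := ∀ (fabrics : List (String × Int)) (budget : Int), Dom_find_best_fabric_pair fabrics budget → Spec_find_best_fabric_pair fabrics budget (find_best_fabric_pair fabrics budget)

-- ===== LEMMAS AND PROOFS =====

-- the comparison sorted2 uses (Python's lexicographic tuple '<' on (cost, name))
def pvBefore (a b : Int × String) : Bool :=
  decide (a.1 < b.1) || (!decide (b.1 < a.1) && decide (a.2 < b.2))

lemma pvBefore_false_iff (a b : Int × String) :
    pvBefore a b = false ↔ (b.1 < a.1 ∨ (a.1 = b.1 ∧ b.2.toList ≤ a.2.toList)) := by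
  simp [pvBefore]
  constructor
  · rintro ⟨h1, h2⟩
    rcases lt_or_ge b.1 a.1 with h | h
    · exact Or.inl h
    · exact Or.inr ⟨by omega, h2 (by omega)⟩
  · rintro (h | ⟨h1, h2⟩)
    · exact ⟨by omega, fun h' => by omega⟩
    · exact ⟨by omega, fun _ => h2⟩

lemma pvBefore_asymm {a b : Int × String} (h : pvBefore a b = true) : pvBefore b a = false := by
  rw [pvBefore_false_iff]
  simp [pvBefore] at h
  rcases h with h | ⟨h1, h2⟩
  · exact Or.inl h
  · rcases lt_or_ge a.1 b.1 with hl | hl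
    · exact Or.inl hl
    · exact Or.inr ⟨by omega, le_of_lt h2⟩

lemma pvBefore_trans_neg {a b c : Int × String} (h1 : pvBefore b a = false)
    (h2 : pvBefore c b = false) : pvBefore c a = false := by
  rw [pvBefore_false_iff] at *
  rcases h1 with h1 | ⟨h1a, h1b⟩ <;> rcases h2 with h2 | ⟨h2a, h2b⟩
  · exact Or.inl (by omega)
  · exact Or.inl (by omega)
  · exact Or.inl (by omega)
  · exact Or.inr ⟨by omega, le_trans h1b h2b⟩

lemma pvInsertBy_pairwise (x : Int × String) (ys : List (Int × String))
    (h : ys.Pairwise (fun a b => pvBefore b a = false)) :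
    (PySem.List.insertBy pvBefore x ys).Pairwise (fun a b => pvBefore b a = false) := by
  induction ys with
  | nil => simp [PySem.List.insertBy]
  | cons y ys ih =>
    rw [List.pairwise_cons] at h
    obtain ⟨hy, hys⟩ := h
    by_cases hb : pvBefore x y = true
    · simp only [PySem.List.insertBy, hb, if_true]
      refine List.pairwise_cons.mpr ⟨?_, List.pairwise_cons.mpr ⟨hy, hys⟩⟩
      intro z hz
      rcases List.mem_cons.mp hz with hzy | hz
      · subst hzy; exact pvBefore_asymm hb
      · exact pvBefore_trans_neg (pvBefore_asymm hb) (hy z hz)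
    · simp only [PySem.List.insertBy, hb]
      refine List.pairwise_cons.mpr ⟨?_, ih hys⟩
      intro z hz
      rcases (PySem.List.insertBy_mem_iff _ _ _ _).1 hz with hzx | hzy
      · subst hzx; exact eq_false_of_ne_true hb
      · exact hy z hzy

lemma pvFoldl_insertBy_pairwise (xs acc : List (Int × String))
    (hacc : acc.Pairwise (fun a b => pvBefore b a = false)) :
    (xs.foldl (fun acc x => PySem.List.insertBy pvBefore x acc) acc).Pairwise
      (fun a b => pvBefore b a = false) := by
  induction xs generalizing acc with
  | nil => exact hacc
  | cons x xs ih => exact ih _ (pvInsertBy_pairwise x acc hacc)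

lemma pvSorted2_pairwise (xs : List (Int × String)) :
    (PySem.List.sorted2 xs (fun p => p.1) (fun p => p.2)).Pairwise (fun a b => a.1 ≤ b.1) := by
  have h : (PySem.List.sorted2 xs (fun p => p.1) (fun p => p.2)).Pairwise
      (fun a b => pvBefore b a = false) := by
    show (xs.foldl (fun acc x => PySem.List.insertBy pvBefore x acc) []).Pairwise _
    exact pvFoldl_insertBy_pairwise xs [] (by simp)
  refine h.imp ?_
  intro a b hab
  rw [pvBefore_false_iff] at hab
  rcases hab with h | ⟨h1, _⟩ <;> omega

-- a fold whose every step fixes the initial state returns it unchanged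
lemma pvFoldl_fixed {α β : Type} (f : β → α → β) (st : β) (l : List α)
    (h : ∀ x ∈ l, f st x = st) : l.foldl f st = st := by
  induction l with
  | nil => rfl
  | cons x xs ih =>
    rw [List.foldl_cons, h x (List.mem_cons_self), ih (fun y hy => h y (List.mem_cons_of_mem _ hy))]

lemma pvInnerB_noop (budget ci : Int) (ni : String) (rest : List (Int × String))
    (st : Int × (Option String × Option String))
    (h : ∀ p ∈ rest, budget < ci + p.1) :
    pvInnerB budget ci ni rest st = st := by
  unfold pvInnerB
  refine pvFoldl_fixed _ _ _ ?_
  intro p hp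
  have := h p (List.mem_reverse.1 hp)
  simp only []
  rw [if_neg]
  rintro ⟨h1, _⟩; omega

lemma pvLoopB_noop (budget : Int) (t : List (Int × String))
    (st : Int × (Option String × Option String))
    (h : t.Pairwise (fun x y => budget < x.1 + y.1)) :
    pvLoopB budget t st = st.2 := by
  induction t generalizing st with
  | nil => rfl
  | cons p rest ih =>
    rw [List.pairwise_cons] at h
    obtain ⟨hp, hrest⟩ := h
    obtain ⟨ci, ni⟩ := p
    show pvLoopB budget rest (pvInnerB budget ci ni rest st) = st.2
    rw [pvInnerB_noop budget ci ni rest st (fun q hq => hp q hq)]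
    exact ih st hrest

-- THE BRIDGE: A's two-pointer loop from window (l, r) equals B's brute-force loop over the
-- suffix from l, provided every column right of r is over budget when paired with row l.
lemma pvBridge (s : List (Int × String)) (budget : Int)
    (hmono : ∀ i j : Nat, (hij : i < j) → (hj : j < s.length) → (s[i]'(by omega)).1 ≤ (s[j]'hj).1)
    (k l r : Nat) (hk : r - l = k) (hl : l ≤ r) (hr : r < s.length)
    (H : ∀ j : Nat, (hrj : r < j) → (hj : j < s.length) → budget < (s[l]'(by omega)).1 + (s[j]'hj).1)
    (bs : Int) (bp : Option String × Option String) :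
    pvLoopA s budget (l : Int) (r : Int) bs bp = pvLoopB budget (s.drop l) (bs, bp) := by
  induction k generalizing l r bs bp with
  | zero =>
    have hlr : l = r := by omega
    subst hlr
    rw [pvLoopA, dif_neg (by omega)]
    have hpw : (s.drop l).Pairwise (fun x y => budget < x.1 + y.1) := by
      rw [List.pairwise_iff_getElem]
      intro i j hi hj hij
      rw [List.getElem_drop, List.getElem_drop]
      have h1 : budget < (s[l]'(by omega)).1 + (s[l + j]'(by simp at hj ⊢; omega)).1 :=
        H (l + j) (by omega) (by simp at hj ⊢; omega)
      rcases Nat.eq_or_lt_of_le (Nat.le_add_right l i) with he | hlt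
      · have hi0 : i = 0 := by omega
        subst hi0
        have he2 : (s[l]'(by omega)).1 = (s[l + 0]'(by simp at hi ⊢; omega)).1 := by simp
        omega
      · have h2 := hmono l (l + i) hlt (by simp at hi ⊢; omega)
        omega
    exact (pvLoopB_noop budget (s.drop l) (bs, bp) hpw).symm
  | succ k ih =>
    have hlr : l < r := by omega
    have hln : l < s.length := by omega
    rw [pvLoopA, dif_pos (by exact_mod_cast hlr)]
    have hgl : PySem.List.pyGetD s (l : Int) (0, "") = s[l]'hln := by
      rw [PySem.List.pyGetD_natCast]; exact List.getD_eq_getElem s _ hln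
    have hgr : PySem.List.pyGetD s (r : Int) (0, "") = s[r]'hr := by
      rw [PySem.List.pyGetD_natCast]; exact List.getD_eq_getElem s _ hr
    simp only [hgl, hgr]
    set ci := (s[l]'hln).1 with hci
    set cr := (s[r]'hr).1 with hcr
    by_cases hb : ci + cr > budget
    · -- right -= 1 : column r is over budget for every row ≥ l
      rw [if_pos hb]
      have : ((r : Int) - 1) = ((r - 1 : Nat) : Int) := by omega
      rw [this]
      refine ih l (r - 1) (by omega) (by omega) (by omega) ?_ bs bp
      intro j hj hjn
      rcases Nat.eq_or_lt_of_le (Nat.succ_le_of_lt hj) with he | hlt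
      · have : j = r := by omega
        subst this; omega
      · exact H j (by omega) hjn
    · -- processed pair (l, r); the rest of row l cannot improve, so the whole row folds away
      rw [if_neg hb]
      have hdrop : s.drop l = (s[l]'hln) :: s.drop (l + 1) := List.drop_eq_getElem_cons hln
      -- decompose the reversed rest of row l: columns > r (over budget), then r (the update),
      -- then r-1 … l+1 (cannot beat the new best)
      have hrest : s.drop (l + 1) = ((s.drop (l + 1)).take (r - l)) ++ s.drop (r + 1) := by
        have h0 := (List.take_append_drop (r - l) (s.drop (l + 1))).symm
        have h1 : List.drop (r - l) (List.drop (l + 1) s) = List.drop (r + 1) s := by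
          rw [List.drop_drop]
          congr 1
          omega
        rw [h1] at h0
        exact h0
      have hlen_take : ((s.drop (l + 1)).take (r - l)).length = r - l := by
        simp; omega
      have htake : (s.drop (l + 1)).take (r - l)
          = ((s.drop (l + 1)).take (r - l - 1)) ++ [s[r]'hr] := by
        have h1 : r - l = (r - l - 1) + 1 := by omega
        rw [h1, List.take_add_one]
        congr 1
        have hidx : r - l - 1 < (s.drop (l + 1)).length := by simp; omega
        rw [List.getElem?_eq_getElem hidx, List.getElem_drop]
        simp only [Option.toList_some]
        congr 2
        omega
      -- compute B's treatment of row l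
      have hrow : pvInnerB budget ci ((s[l]'hln).2) (s.drop (l + 1)) (bs, bp)
          = if ci + cr > bs then (ci + cr, (some (s[l]'hln).2, some (s[r]'hr).2)) else (bs, bp) := by
        unfold pvInnerB
        rw [hrest, htake, List.reverse_append, List.reverse_append, List.foldl_append, List.foldl_append]
        rw [pvFoldl_fixed _ (bs, bp) (s.drop (r + 1)).reverse (by
          intro p hp
          rw [List.mem_reverse] at hp
          obtain ⟨j, hjlen, hpj⟩ := List.getElem_of_mem hp
          rw [List.getElem_drop] at hpj
          have := H (r + 1 + j) (by omega) (by simp at hjlen; omega)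
          simp only []
          rw [if_neg]
          rintro ⟨h1, _⟩
          rw [← hpj] at h1
          omega)]
        rw [List.reverse_singleton, List.foldl_cons, List.foldl_nil]
        simp only []
        by_cases hup : ci + cr ≤ budget ∧ ci + cr > bs
        · rw [if_pos hup, if_pos hup.2]
          refine pvFoldl_fixed _ _ _ ?_
          intro p hp
          rw [List.mem_reverse] at hp
          have hple : p.1 ≤ cr := by
            obtain ⟨j, hjlen, hpj⟩ := List.getElem_of_mem hp
            have hjb : j < r - l - 1 := by simp at hjlen; omega
            rw [List.getElem_take, List.getElem_drop] at hpj
            rw [← hpj]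
            exact hmono (l + 1 + j) r (by omega) hr
          rw [if_neg]
          rintro ⟨_, h2⟩
          omega
        · have hup' : ¬ ci + cr > bs := by
            rcases not_and_or.1 hup with h | h
            · omega
            · exact h
          rw [if_neg hup, if_neg hup']
          refine pvFoldl_fixed _ _ _ ?_
          intro p hp
          rw [List.mem_reverse] at hp
          have hple : p.1 ≤ cr := by
            obtain ⟨j, hjlen, hpj⟩ := List.getElem_of_mem hp
            have hjb : j < r - l - 1 := by simp at hjlen; omega
            rw [List.getElem_take, List.getElem_drop] at hpj
            rw [← hpj]
            exact hmono (l + 1 + j) r (by omega) hr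
          rw [if_neg]
          rintro ⟨_, h2⟩
          omega
      have hrec : ∀ st : Int × (Option String × Option String),
          pvLoopB budget (s.drop l) st = pvLoopB budget (s.drop (l + 1)) (pvInnerB budget ci ((s[l]'hln).2) (s.drop (l + 1)) st) := by
        intro st
        rw [hdrop]
        rfl
      have hH' : ∀ j : Nat, r < j → (hj : j < s.length) → budget < (s[l + 1]'(by omega)).1 + (s[j]'hj).1 := by
        intro j hj hjn
        have h1 := H j hj hjn
        have h2 := hmono l (l + 1) (by omega) (by omega)
        omega
      by_cases hupd : ci + cr > bs
      · rw [if_pos hupd]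
        have : ((l : Int) + 1) = ((l + 1 : Nat) : Int) := by omega
        rw [this]
        rw [ih (l + 1) r (by omega) (by omega) hr hH' (ci + cr) (some (s[l]'hln).2, some (s[r]'hr).2)]
        rw [hrec, hrow, if_pos hupd]
      · rw [if_neg hupd]
        have : ((l : Int) + 1) = ((l + 1 : Nat) : Int) := by omega
        rw [this]
        rw [ih (l + 1) r (by omega) (by omega) hr hH' bs bp]
        rw [hrec, hrow, if_neg hupd]

-- ===== VERDICT (by name: the statement is the Claim_ definition above) =====
theorem find_best_fabric_pair_spec : Claim_equal_find_best_fabric_pair := by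
  intro fabrics budget _
  show find_best_fabric_pair fabrics budget = find_best_fabric_pair_alt fabrics budget
  unfold find_best_fabric_pair find_best_fabric_pair_alt
  simp only []
  set s := PySem.List.sorted2 (fabrics.map (fun p => (p.2, p.1))) (fun x => x.1) (fun x => x.2) with hs
  have hlen : s.length = fabrics.length := by
    rw [hs]
    rw [(PySem.List.sorted2_perm _ _ _ _).length_eq, List.length_map]
  have hmono : ∀ i j : Nat, (hij : i < j) → (hj : j < s.length) → (s[i]'(Nat.lt_trans hij hj)).1 ≤ (s[j]'hj).1 := by
    have hp := pvSorted2_pairwise (fabrics.map (fun p => (p.2, p.1)))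
    rw [← hs] at hp
    rw [List.pairwise_iff_getElem] at hp
    intro i j hij hj
    exact hp i j (by omega) hj hij
  by_cases hn : fabrics.length = 0
  · have hse : s = [] := by
      rw [List.eq_nil_iff_length_eq_zero]; omega
    rw [hn, hse]
    rw [pvLoopA, dif_neg (by omega)]
    rfl
  · have h1 : (fabrics.length : Int) - 1 = ((fabrics.length - 1 : Nat) : Int) := by omega
    rw [h1]
    have := pvBridge s budget hmono (fabrics.length - 1) 0 (fabrics.length - 1) (by omega)
      (by omega) (by omega) (by intro j hj hjn; omega) (-1) (none, none)
    rw [Nat.cast_zero] at this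
    rw [this, List.drop_zero]
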